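-- pv_equiv track=rewrite | github.com/pypi-data/pypi-mirror-297 | packages/pktlab/pktlab-1.0.4-py3-none-any.whl/pktlab/ppks/_utils.py | is_valid_limit_name_str
-- ===== SOURCE A (Python) =====
-- def is_valid_limit_name_str(name_str): # for unknown limit fields
--     valid_special_char = {
--         '_', '-',
--     }
--
--     # at least one char needed
--     if len(name_str) == 0:
--         return False
--
--     if len(name_str) == 1 and name_str == '*':
--         return False
--
--     if name_str[0] == '*':
--         name_str = name_str[1:]
--
--     # only special char and alnum allowed
--     for i in name_str:
--         if i not in valid_special_char and \
--            not is_alnum(i):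
--            return False
--
--     return True
--
-- def is_alpha(c):
--     return \
--         ('a' <= c and c <= 'z') or \
--         ('A' <= c and c <= 'Z')
--
-- def is_digit(c):
--     return ('0' <= c and c <= '9')
--
-- def is_alnum(c):
--     return is_digit(c) or is_alpha(c)
-- ===== SOURCE B (Python) =====
-- import re
--
-- # fullmatch of: optional leading '*', then one or more ASCII [A-Za-z0-9_-] and nothing else
-- _NAME_RE = re.compile(r'\*?[A-Za-z0-9_-]+')
--
-- def is_valid_limit_name_str(name_str):
--     return _NAME_RE.fullmatch(name_str) is not None
-- ===== Notes on version B (the rewrite author's own statement) =====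
-- stated objective: idiomatic
-- what changed: Replaces the guard chain plus explicit per-character loop over a special-char set by one regular-expression fullmatch of r'\*?[A-Za-z0-9_-]+' (optional leading star, then at least one allowed ASCII character).
import Mathlib
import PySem

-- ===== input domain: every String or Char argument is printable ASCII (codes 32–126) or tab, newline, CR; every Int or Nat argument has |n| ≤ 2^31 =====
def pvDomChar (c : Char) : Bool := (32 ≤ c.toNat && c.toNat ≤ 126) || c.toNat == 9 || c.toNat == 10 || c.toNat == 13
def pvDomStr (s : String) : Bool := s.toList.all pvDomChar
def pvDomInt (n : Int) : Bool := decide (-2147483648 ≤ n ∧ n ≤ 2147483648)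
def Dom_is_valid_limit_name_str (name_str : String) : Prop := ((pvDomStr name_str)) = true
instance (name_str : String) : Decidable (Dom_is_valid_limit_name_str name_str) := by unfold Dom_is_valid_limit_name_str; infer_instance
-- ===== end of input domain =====

-- B replaces A's guard chain and explicit validation loop by a single regular-expression
-- fullmatch of r'\*?[A-Za-z0-9_-]+' (objective: idiomatic).


-- ===== PORT A =====
def pv_is_alpha (c : Char) : Bool :=
  (decide ('a' ≤ c) && decide (c ≤ 'z')) || (decide ('A' ≤ c) && decide (c ≤ 'Z'))

def pv_is_digit (c : Char) : Bool :=
  decide ('0' ≤ c) && decide (c ≤ '9')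

def pv_is_alnum (c : Char) : Bool :=
  pv_is_digit c || pv_is_alpha c

-- the 'for i in name_str: if … return False' loop, as structural recursion
def pvCheckChars (valid_special_char : PySem.Set Char) : List Char → Bool
  | [] => true
  | i :: rest =>
      if !(valid_special_char.contains i) && !(pv_is_alnum i) then false
      else pvCheckChars valid_special_char rest

def is_valid_limit_name_str (name_str : String) : Bool :=
  let cs := name_str.toList
  if cs.length = 0 then false
  else if cs.length = 1 && name_str == "*" then false
  else
    -- name_str[0] == '*' (length ≠ 0 here, so head access is safe); name_str[1:] = drop 1
    let cs2 := if cs.head? == some '*' then cs.drop 1 else cs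
    pvCheckChars (PySem.Set.ofList ['_', '-']) cs2

-- ===== PORT B =====
-- PySem has no regex, so re.fullmatch(r'\*?[A-Za-z0-9_-]+', s) is ported by hand, exactly,
-- as the automaton this pattern denotes: the character class [A-Za-z0-9_-] …
def pvIsClass (c : Char) : Bool :=
  (decide ('A' ≤ c) && decide (c ≤ 'Z')) || (decide ('a' ≤ c) && decide (c ≤ 'z')) ||
  (decide ('0' ≤ c) && decide (c ≤ '9')) || c == '_' || c == '-'

-- … and the minimal DFA of \*?[A-Za-z0-9_-]+ :
-- state 0 = start, 3 = just consumed the optional '*', 1 = inside the '+' (accepting), 2 = dead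
def pvDfaStep (st : Nat) (c : Char) : Nat :=
  match st with
  | 0 => if c == '*' then 3 else if pvIsClass c then 1 else 2
  | 3 => if pvIsClass c then 1 else 2
  | 1 => if pvIsClass c then 1 else 2
  | _ => 2

-- fullmatch = run the DFA over the whole string and test for the accepting state
def is_valid_limit_name_str_alt (name_str : String) : Bool :=
  name_str.toList.foldl pvDfaStep 0 == 1

-- ===== PRECONDITION & SPEC =====
def Spec_is_valid_limit_name_str (name_str : String) (out : Bool) : Prop := out = is_valid_limit_name_str_alt name_str
instance (name_str : String) (out : Bool) : Decidable (Spec_is_valid_limit_name_str name_str out) := by unfold Spec_is_valid_limit_name_str; infer_instance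

-- ===== CLAIM (what is proved, stated in full; the proofs are below) =====
def Claim_equal_is_valid_limit_name_str : Prop := ∀ (name_str : String), Dom_is_valid_limit_name_str name_str → Spec_is_valid_limit_name_str name_str (is_valid_limit_name_str name_str)

-- ===== LEMMAS AND PROOFS =====

-- per-character agreement: A's "special char or alnum" test equals the regex character class
theorem pv_char_agree (c : Char) :
    ((PySem.Set.ofList ['_', '-']).contains c || pv_is_alnum c) = pvIsClass c := by
  rw [show (PySem.Set.ofList ['_', '-'] : PySem.Set Char) = ['_', '-'] from by decide]
  rw [Bool.eq_iff_iff]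
  simp only [PySem.Set.contains, List.contains_cons, List.contains_nil, pv_is_alnum, pv_is_digit,
    pv_is_alpha, pvIsClass, Bool.or_eq_true, Bool.and_eq_true, beq_iff_eq,
    decide_eq_true_eq, Bool.false_eq_true, or_false]
  tauto

-- the dead state is absorbing
theorem pvDfa_dead (l : List Char) : l.foldl pvDfaStep 2 = 2 := by
  induction l with
  | nil => rfl
  | cons c rest ih => simpa [pvDfaStep] using ih

-- from the accepting state, acceptance means every remaining char is in the class
theorem pvDfa_acc (l : List Char) : (l.foldl pvDfaStep 1 == 1) = l.all pvIsClass := by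
  induction l with
  | nil => rfl
  | cons c rest ih =>
      by_cases h : pvIsClass c = true
      · simp [pvDfaStep, h, ih]
      · simp [pvDfaStep, h, pvDfa_dead]

theorem toList_eq_star (s : String) (h : s.toList = ['*']) : s = "*" :=
  String.toList_inj.mp (by rw [h]; rfl)

-- A's loop computes exactly "all chars in the class"
theorem pvCheckChars_eq_all (l : List Char) :
    pvCheckChars (PySem.Set.ofList ['_', '-']) l = l.all pvIsClass := by
  induction l with
  | nil => rfl
  | cons i rest ih =>
      rw [pvCheckChars, List.all_cons, ih, ← pv_char_agree i]
      cases hsp : (PySem.Set.ofList ['_', '-']).contains i <;>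
        cases hal : pv_is_alnum i <;> simp

-- ===== VERDICT (by name: the statement is the Claim_ definition above) =====
theorem is_valid_limit_name_str_spec : Claim_equal_is_valid_limit_name_str := by
  intro s _
  unfold Spec_is_valid_limit_name_str is_valid_limit_name_str is_valid_limit_name_str_alt
  cases h : s.toList with
  | nil => simp
  | cons c rest =>
      by_cases hc : c = '*'
      · subst hc
        cases rest with
        | nil => simp [toList_eq_star s h, pvDfaStep]
        | cons d rest' =>
            have : (('*' :: d :: rest').foldl pvDfaStep 0 == 1) = (d :: rest').all pvIsClass := by
              by_cases hd : pvIsClass d = true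
              · simp [pvDfaStep, hd, pvDfa_acc]
              · simp [pvDfaStep, hd, pvDfa_dead]
            simp [pvCheckChars_eq_all]
            simpa [List.foldl_cons, List.all_cons] using this.symm
      · have hne : s ≠ "*" := by
          intro hs
          apply hc
          have h2 : s.toList = ['*'] := by rw [hs]; rfl
          rw [h] at h2
          exact (List.cons_eq_cons.mp h2).1
        have hfold : ((c :: rest).foldl pvDfaStep 0 == 1) = (c :: rest).all pvIsClass := by
          have hstar : (c == '*') = false := by simpa using hc
          by_cases hcc : pvIsClass c = true
          · simp [pvDfaStep, hstar, hcc, pvDfa_acc]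
          · simp [pvDfaStep, hstar, hcc, pvDfa_dead]
        simp [hc, hne, pvCheckChars_eq_all]
        simpa [List.foldl_cons, List.all_cons] using hfold.symm
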